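-- pv_equiv track=rewrite | github.com/xm1k/LoginHunt | pick_logins.py | apply_replacements_with_case
-- ===== SOURCE A (Python) =====
-- from itertools import product
--
-- replacements = {
--     'a': ['4', '_'],
--     'b': ['8'],
--     'e': ['3'],
--     'g': ['9'],
--     'i': ['1'],
--     'o': ['0', '_'],
--     's': ['5'],
--     'z': ['2'],
-- }
--
-- def apply_replacements_with_case(word):
--     positions = []
--     for i, char in enumerate(word):
--         variations = [char.lower(), char.upper()]
--         if char.lower() in replacements:
--             variations.extend(replacements[char.lower()])
--         positions.append((i, variations))
--
--     all_variations = set()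
--     for combo in product(*[pos[1] for pos in positions]):
--         temp_word = list(word)
--         changes = 0
--         for (i, chars), new_char in zip(positions, combo):
--             if temp_word[i] != new_char:
--                 if new_char == '_':
--                     changes += 3
--                 else:
--                     changes += 1
--                 temp_word[i] = new_char
--
--         temp_word_str = ''.join(temp_word)
--         if temp_word_str[-1] == '_':
--             continue
--
--         all_variations.add((''.join(temp_word), changes))
--
--     return all_variations
-- ===== SOURCE B (Python) =====
-- replacements = {
--     'a': ['4', '_'],
--     'b': ['8'],
--     'e': ['3'],
--     'g': ['9'],
--     'i': ['1'],
--     'o': ['0', '_'],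
--     's': ['5'],
--     'z': ['2'],
-- }
--
-- def apply_replacements_with_case(word):
--     # Incremental construction: extend every partial variant one position at a
--     # time, accumulating the cost against the original character as we go.
--     partials = [("", 0)]
--     for ch in word:
--         lo = ch.lower()
--         opts = [lo, ch.upper()] + replacements.get(lo, [])
--         partials = [(p + c, cost + (0 if c == ch else 3 if c == '_' else 1))
--                     for p, cost in partials for c in opts]
--     return {pc for pc in partials if not pc[0].endswith('_')}
-- ===== Notes on version B (the rewrite author's own statement) =====
-- stated objective: alternative
-- what changed: Replaces itertools.product over all positions followed by a per-combo rescan-and-score loop with a single left-to-right pass that extends every (partial_string, partial_cost) pair by each allowed character, accumulating the cost incrementally.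
-- crash fix: On the empty word A raises IndexError (it indexes temp_word_str[-1]); B naturally returns {('', 0)}. — e.g. on apply_replacements_with_case(""): A raises IndexError, B returns [("", 0)]
import Mathlib
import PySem

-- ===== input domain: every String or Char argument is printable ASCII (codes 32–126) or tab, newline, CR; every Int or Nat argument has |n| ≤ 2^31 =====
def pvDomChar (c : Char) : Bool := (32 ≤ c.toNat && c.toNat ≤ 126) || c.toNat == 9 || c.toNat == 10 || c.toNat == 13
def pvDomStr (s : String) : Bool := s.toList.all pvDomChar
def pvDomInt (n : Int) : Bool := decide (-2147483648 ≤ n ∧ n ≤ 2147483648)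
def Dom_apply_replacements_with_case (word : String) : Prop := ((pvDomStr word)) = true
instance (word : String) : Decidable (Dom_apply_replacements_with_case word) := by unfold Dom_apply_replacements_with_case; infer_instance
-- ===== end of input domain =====

-- B replaces the product-then-rescore enumeration by one incremental left-to-right pass over the
-- word that extends (partial, cost) pairs; equal results on every non-empty word ('' makes A raise).


-- module-level constant `replacements` (single-char Python strings modelled as Char)
def pvRepl : PySem.Dict Char (List Char) := PySem.Dict.mk
  [('a', ['4', '_']), ('b', ['8']), ('e', ['3']), ('g', ['9']),
   ('i', ['1']), ('o', ['0', '_']), ('s', ['5']), ('z', ['2'])]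

-- ===== PORT A =====
-- itertools.product(*lists): first list varies slowest (CPython order)
def pvProduct : List (List Char) → List (List Char)
  | [] => [[]]
  | l :: ls => l.flatMap (fun x => (pvProduct ls).map (fun p => x :: p))

def apply_replacements_with_case (word : String) : List (String × Int) :=
  let positions : List (Int × List Char) :=
    (PySem.List.enumerate word.toList 0).foldl
      (fun ps ic =>
        ps ++ [(ic.1, [PySem.Chars.lowerChar ic.2, PySem.Chars.upperChar ic.2] ++
                 (if PySem.Dict.contains pvRepl (PySem.Chars.lowerChar ic.2) then
                    PySem.Dict.getD pvRepl (PySem.Chars.lowerChar ic.2) [] else []))]) []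
  let combos := pvProduct (positions.map (·.2))
  combos.foldl
    (fun s combo =>
      let tc := (positions.zip combo).foldl
        (fun (tc : List Char × Int) pc =>
          if PySem.List.pyGetD tc.1 pc.1.1 ' ' ≠ pc.2 then
            (PySem.List.pySetD tc.1 pc.1.1 pc.2,
             tc.2 + (if pc.2 = '_' then 3 else 1))
          else tc)
        (word.toList, 0)
      -- temp_word_str[-1] == '_' : on '' Python raises IndexError (pyGet? = none); Pre_ excludes ''
      if PySem.Str.pyGet? (String.ofList tc.1) (-1) == some '_' then s
      else PySem.Set.add s (String.ofList tc.1, tc.2))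
    PySem.Set.empty

-- ===== PORT B =====
def apply_replacements_with_case_alt (word : String) : List (String × Int) :=
  let partials := word.toList.foldl
    (fun ps ch =>
      let lo := PySem.Chars.lowerChar ch
      let opts := [lo, PySem.Chars.upperChar ch] ++ PySem.Dict.getD pvRepl lo []
      ps.flatMap (fun pc => opts.map (fun c =>
        (pc.1 ++ [c], pc.2 + (if c = ch then 0 else if c = '_' then 3 else 1)))))
    [(([] : List Char), (0 : Int))]
  -- p.endswith('_') for the single char '_' is the last-character test
  PySem.Set.ofList ((partials.filter (fun pc => pc.1.getLast? != some '_')).map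
    (fun pc => (String.ofList pc.1, pc.2)))

-- ===== PRECONDITION & SPEC =====
-- Pre_ excludes only the empty word, on which A raises IndexError (temp_word_str[-1]).
def Pre_apply_replacements_with_case (word : String) : Prop := word ≠ ""
instance (word : String) : Decidable (Pre_apply_replacements_with_case word) := by
  unfold Pre_apply_replacements_with_case; infer_instance
def pvWitness_apply_replacements_with_case : String := "a"

-- On the empty word A raises IndexError while B returns {('', 0)}.
def Raises_apply_replacements_with_case (word : String) : Prop := word = ""
instance (word : String) : Decidable (Raises_apply_replacements_with_case word) := by
  unfold Raises_apply_replacements_with_case; infer_instance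
def pvRaiseWitness_apply_replacements_with_case : String := ""
def pvRaiseWitnessOut_apply_replacements_with_case : List (String × Int) := [("", 0)]

def Spec_apply_replacements_with_case (word : String) (out : List (String × Int)) : Prop := out = apply_replacements_with_case_alt word
instance (word : String) (out : List (String × Int)) : Decidable (Spec_apply_replacements_with_case word out) := by unfold Spec_apply_replacements_with_case; infer_instance

-- ===== CLAIM (what is proved, stated in full; the proofs are below) =====
def Claim_equal_apply_replacements_with_case : Prop := ∀ (word : String), Dom_apply_replacements_with_case word → Pre_apply_replacements_with_case word → Spec_apply_replacements_with_case word (apply_replacements_with_case word)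
def Claim_raises_apply_replacements_with_case : Prop := (∀ (word : String), Dom_apply_replacements_with_case word → Raises_apply_replacements_with_case word → ¬ Pre_apply_replacements_with_case word) ∧ (Dom_apply_replacements_with_case (pvRaiseWitness_apply_replacements_with_case) ∧ Raises_apply_replacements_with_case (pvRaiseWitness_apply_replacements_with_case) ∧ apply_replacements_with_case_alt (pvRaiseWitness_apply_replacements_with_case) = pvRaiseWitnessOut_apply_replacements_with_case)

-- ===== LEMMAS AND PROOFS =====

def pvCost (orig c : Char) : Int := if c = orig then 0 else if c = '_' then 3 else 1

def pvOpts (c : Char) : List Char :=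
  [PySem.Chars.lowerChar c, PySem.Chars.upperChar c] ++
    PySem.Dict.getD pvRepl (PySem.Chars.lowerChar c) []

def pvCostSum (orig combo : List Char) : Int :=
  ((orig.zip combo).map (fun p => pvCost p.1 p.2)).sum

lemma pvProduct_snoc (ls : List (List Char)) (l : List Char) :
    pvProduct (ls ++ [l]) = (pvProduct ls).flatMap (fun p => l.map (fun x => p ++ [x])) := by
  induction ls with
  | nil =>
    simp only [List.nil_append, pvProduct]
    induction l with
    | nil => rfl
    | cons y ys ihy => simpa [pvProduct] using ihy
  | cons a as ih =>
    simp [pvProduct, ih, List.flatMap_assoc, List.flatMap_map, List.map_flatMap, List.map_map, Function.comp_def,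
      List.cons_append]
lemma pvProduct_length_mem (ls : List (List Char)) : ∀ p ∈ pvProduct ls, p.length = ls.length := by
  induction ls with
  | nil => simp [pvProduct]
  | cons a as ih =>
    intro p hp
    simp only [pvProduct, List.mem_flatMap, List.mem_map] at hp
    obtain ⟨x, _, q, hq, rfl⟩ := hp
    simp [ih q hq]
lemma pvCostSum_snoc (orig combo : List Char) (h : combo.length = orig.length) (c x : Char) :
    pvCostSum (orig ++ [c]) (combo ++ [x]) = pvCostSum orig combo + pvCost c x := by
  simp [pvCostSum, List.zip_append h.symm]
lemma pv_set_fold {β : Type} (l : List β) (P : β → Bool) (f : β → String × Int)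
    (s : PySem.Set (String × Int)) :
    l.foldl (fun s b => if P b then s else PySem.Set.add s (f b)) s
      = PySem.Set.update s ((l.filter (fun b => !P b)).map f) := by
  induction l generalizing s with
  | nil => simp [PySem.Set.update]
  | cons b bs ih =>
    by_cases h : P b <;> simp [h, ih, PySem.Set.update]

lemma pvB_fold (xs : List Char) :
    xs.foldl
      (fun ps ch =>
        let lo := PySem.Chars.lowerChar ch
        let opts := [lo, PySem.Chars.upperChar ch] ++ PySem.Dict.getD pvRepl lo []
        ps.flatMap (fun pc => opts.map (fun c =>
          (pc.1 ++ [c], pc.2 + (if c = ch then 0 else if c = '_' then 3 else 1)))))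
      [(([] : List Char), (0 : Int))]
    = (pvProduct (xs.map pvOpts)).map (fun combo => (combo, pvCostSum xs combo)) := by
  induction xs using List.reverseRecOn with
  | nil => simp [pvProduct, pvCostSum]
  | append_singleton xs c ih =>
    rw [List.foldl_append, ih]
    simp only [List.foldl_cons, List.foldl_nil, List.map_append, List.map_cons, List.map_nil,
      pvProduct_snoc]
    rw [List.map_flatMap, List.flatMap_map]
    apply List.flatMap_congr
    intro p hp
    have hlen : p.length = xs.length := by
      simpa using pvProduct_length_mem _ p hp
    simp only [List.map_map, Function.comp_def]
    have hR : List.map (fun x => (p ++ [x], pvCostSum (xs ++ [c]) (p ++ [x]))) (pvOpts c)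
        = List.map (fun x => (p ++ [x], pvCostSum xs p + pvCost c x)) (pvOpts c) :=
      List.map_congr_left (fun x _ => by rw [pvCostSum_snoc xs p hlen c x])
    rw [hR]
    simp [pvOpts, pvCost]
lemma pvA_inner (orig : List Char) : ∀ (combo pre : List Char) (acc : Int),
    combo.length = orig.length →
    (((PySem.List.enumerate orig (pre.length : Int)).map
        (fun ic => (ic.1, pvOpts ic.2))).zip combo).foldl
      (fun (tc : List Char × Int) pc =>
        if PySem.List.pyGetD tc.1 pc.1.1 ' ' ≠ pc.2 then
          (PySem.List.pySetD tc.1 pc.1.1 pc.2,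
           tc.2 + (if pc.2 = '_' then 3 else 1))
        else tc)
      (pre ++ orig, acc)
    = (pre ++ combo, acc + pvCostSum orig combo) := by
  induction orig with
  | nil =>
    intro combo pre acc h
    have : combo = [] := List.eq_nil_of_length_eq_zero h
    subst this
    simp [PySem.List.enumerate_nil, pvCostSum]
  | cons o rest ih =>
    intro combo pre acc h
    match combo with
    | x :: cs =>
      simp only [PySem.List.enumerate_cons, List.map_cons, List.zip_cons_cons, List.foldl_cons]
      have hget : PySem.List.pyGetD (pre ++ o :: rest) ((pre.length : Nat) : Int) ' ' = o := by
        simp [List.getD]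
      have hset : PySem.List.pySetD (pre ++ o :: rest) ((pre.length : Nat) : Int) x
          = pre ++ x :: rest := by
        simp
      have hstep : ∀ acc' : Int,
          (if PySem.List.pyGetD (pre ++ o :: rest) ((pre.length : Nat) : Int) ' ' ≠ x then
            (PySem.List.pySetD (pre ++ o :: rest) ((pre.length : Nat) : Int) x,
             acc' + (if x = '_' then 3 else 1))
          else (pre ++ o :: rest, acc'))
          = (pre ++ x :: rest, acc' + pvCost o x) := by
        intro acc'
        rw [hget, hset]
        by_cases hxo : o = x
        · subst hxo; simp [pvCost]
        · simp [Ne.symm hxo, pvCost, hxo]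
      have hlen : ((pre.length : Int) + 1) = (((pre ++ [x]).length : Nat) : Int) := by
        simp
      have hcs : cs.length = rest.length := by simpa using h
      calc _ = (((PySem.List.enumerate rest ((pre.length : Int) + 1)).map
                (fun ic => (ic.1, pvOpts ic.2))).zip cs).foldl _
                (pre ++ x :: rest, acc + pvCost o x) := by rw [hstep acc]
        _ = ((pre ++ [x]) ++ cs, (acc + pvCost o x) + pvCostSum rest cs) := by
              rw [hlen]
              have := ih cs (pre ++ [x]) (acc + pvCost o x) hcs
              simpa using this
        _ = (pre ++ x :: cs, acc + pvCostSum (o :: rest) (x :: cs)) := by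
              simp [pvCostSum, pvCost, add_assoc]

lemma pvVars_eq (c : Char) :
    [PySem.Chars.lowerChar c, PySem.Chars.upperChar c] ++
      (if PySem.Dict.contains pvRepl (PySem.Chars.lowerChar c) then
        PySem.Dict.getD pvRepl (PySem.Chars.lowerChar c) [] else [])
    = pvOpts c := by
  by_cases h : PySem.Dict.contains pvRepl (PySem.Chars.lowerChar c)
  · simp [pvOpts, h]
  · have h' : pvRepl.contains (PySem.Chars.lowerChar c) = false := by simpa using h
    simp [pvOpts, h', PySem.Dict.getD_of_not_contains]

-- ===== VERDICT (by name: the statement is the Claim_ definition above) =====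
theorem apply_replacements_with_case_spec : Claim_equal_apply_replacements_with_case := by
  intro word _ _
  unfold Spec_apply_replacements_with_case
  unfold apply_replacements_with_case apply_replacements_with_case_alt
  simp only []
  rw [pvB_fold]
  have hpos : (PySem.List.enumerate word.toList 0).foldl
      (fun ps ic =>
        ps ++ [(ic.1, [PySem.Chars.lowerChar ic.2, PySem.Chars.upperChar ic.2] ++
                 (if PySem.Dict.contains pvRepl (PySem.Chars.lowerChar ic.2) then
                    PySem.Dict.getD pvRepl (PySem.Chars.lowerChar ic.2) [] else []))]) []
      = (PySem.List.enumerate word.toList 0).map (fun ic => (ic.1, pvOpts ic.2)) := by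
    rw [PySem.List.foldl_append_singleton_eq_map]
    exact List.map_congr_left (fun ic _ => by rw [pvVars_eq])
  rw [hpos]
  have hsnd : ((PySem.List.enumerate word.toList 0).map
      (fun ic => (ic.1, pvOpts ic.2))).map (·.2) = word.toList.map pvOpts := by
    rw [List.map_map]
    have : ((·.2 : Int × List Char → List Char) ∘ fun ic : Int × Char => (ic.1, pvOpts ic.2))
        = pvOpts ∘ (·.2) := rfl
    rw [this, ← List.map_map, PySem.List.map_snd_enumerate]
  rw [hsnd]
  refine Eq.trans (?_ : _ = List.foldl
      (fun (s : PySem.Set (String × Int)) combo =>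
        if (combo.getLast? == some '_') then s
        else PySem.Set.add s (String.ofList combo, pvCostSum word.toList combo))
      PySem.Set.empty (pvProduct (word.toList.map pvOpts))) ?_
  · apply PySem.List.foldl_congr_mem
    intro s combo hc
    have hlen : combo.length = word.toList.length := by
      simpa using pvProduct_length_mem _ combo hc
    have htc := pvA_inner word.toList combo [] 0 hlen
    simp only [List.length_nil, Nat.cast_zero, List.nil_append, zero_add] at htc
    simp only [htc, PySem.Str.pyGet?, String.toList_ofList, PySem.Chars.pyGet?,
      PySem.List.pyGet?_neg_one]
  rw [pv_set_fold]
  have hupd : ∀ l : List (String × Int),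
      PySem.Set.update PySem.Set.empty l = PySem.Set.ofList l := fun _ => rfl
  rw [hupd, List.filter_map, List.map_map]
  congr 1

theorem apply_replacements_with_case_raises : Claim_raises_apply_replacements_with_case := by
  unfold Claim_raises_apply_replacements_with_case
  exact ⟨fun w _ h => by simpa [Pre_apply_replacements_with_case] using h, by decide⟩

-- self-check: the raises theorem really certifies B's value at the raise witness
theorem pvRaiseWitness_ok :
    apply_replacements_with_case_alt pvRaiseWitness_apply_replacements_with_case
      = pvRaiseWitnessOut_apply_replacements_with_case :=
  apply_replacements_with_case_raises.2.2.2
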